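-- pv_equiv track=rewrite | github.com/abhishekir/CodingBat_Solutions | src/Array_2.py | twoTwo
-- ===== SOURCE A (Python) =====
-- def twoTwo(nums):
--     for i in range(len(nums)):
--         if nums[i] == 2:
--             if i-1 >= 0 and nums[i-1] == 2 or i+1 < len(nums) and nums[i+1] == 2:
--                 continue
--             else:
--                 return False
--     return True
-- ===== SOURCE B (Python) =====
-- def twoTwo(nums):
--     # runs-based scan: split nums into maximal runs of equal values;
--     # fail exactly when a run of value 2 has length 1
--     i, n = 0, len(nums)
--     while i < n:
--         j = i
--         while j < n and nums[j] == nums[i]: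
--             j += 1
--         if nums[i] == 2 and j - i == 1:
--             return False
--         i = j
--     return True
-- ===== Notes on version B (the rewrite author's own statement) =====
-- stated objective: alternative
-- what changed: Replaces A's per-index neighbour check (looking at nums[i-1]/nums[i+1] for every 2) with a two-pointer run-length scan that splits the list into maximal runs of equal values and fails exactly on a length-1 run of 2s.
import Mathlib
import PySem

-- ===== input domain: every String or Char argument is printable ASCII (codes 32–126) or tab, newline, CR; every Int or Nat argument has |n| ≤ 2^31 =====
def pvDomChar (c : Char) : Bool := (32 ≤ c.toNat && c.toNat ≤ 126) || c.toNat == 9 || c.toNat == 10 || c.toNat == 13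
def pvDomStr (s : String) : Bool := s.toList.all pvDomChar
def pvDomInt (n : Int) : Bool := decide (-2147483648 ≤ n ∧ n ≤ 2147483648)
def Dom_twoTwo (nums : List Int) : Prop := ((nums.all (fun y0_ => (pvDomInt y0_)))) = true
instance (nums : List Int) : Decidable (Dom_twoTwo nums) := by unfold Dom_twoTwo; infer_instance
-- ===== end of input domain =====

-- B (runs-based two-pointer scan) instead of A's per-index neighbour check; same O(n) cost, different traversal.

-- ===== PORT A =====
-- loop 'for i in range(len(nums))' with early return False; all Python index
-- accesses are guarded to be in range, so List.getD is exact here.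
def twoTwoLoop (nums : List Int) (i : Nat) : Bool :=
  if i < nums.length then
    if nums.getD i 0 = 2 then
      if (1 ≤ i ∧ nums.getD (i - 1) 0 = 2) ∨ (i + 1 < nums.length ∧ nums.getD (i + 1) 0 = 2) then
        twoTwoLoop nums (i + 1)
      else false
    else twoTwoLoop nums (i + 1)
  else true
termination_by nums.length - i

def twoTwo (nums : List Int) : Bool := twoTwoLoop nums 0

-- ===== PORT B =====
-- inner while loop of Source B: advance j over the maximal run of value c
def runEnd (nums : List Int) (c : Int) (j : Nat) : Nat :=
  if j < nums.length ∧ nums.getD j 0 = c then runEnd nums c (j + 1) else j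
termination_by nums.length - j

theorem runEnd_ge (nums : List Int) (c : Int) (j : Nat) : j ≤ runEnd nums c j := by
  fun_induction runEnd with
  | case1 j _ ih => omega
  | case2 j _ => omega

theorem runEnd_gt (nums : List Int) (i : Nat) (h : i < nums.length) :
    i < runEnd nums (nums.getD i 0) i := by
  rw [runEnd]
  simp only [h, and_self, if_true]
  have := runEnd_ge nums (nums.getD i 0) (i + 1)
  omega

-- outer while loop of Source B
def altLoop (nums : List Int) (i : Nat) : Bool :=
  if h : i < nums.length then
    let j := runEnd nums (nums.getD i 0) i
    if nums.getD i 0 = 2 ∧ j - i = 1 then false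
    else altLoop nums j
  else true
termination_by nums.length - i
decreasing_by
  have := runEnd_gt nums i h
  omega

def twoTwo_alt (nums : List Int) : Bool := altLoop nums 0

-- ===== PRECONDITION & SPEC =====
def Spec_twoTwo (nums : List Int) (out : Bool) : Prop := out = twoTwo_alt nums
instance (nums : List Int) (out : Bool) : Decidable (Spec_twoTwo nums out) := by unfold Spec_twoTwo; infer_instance

-- ===== CLAIM (what is proved, stated in full; the proofs are below) =====
def Claim_equal_twoTwo : Prop := ∀ (nums : List Int), Dom_twoTwo nums → Spec_twoTwo nums (twoTwo nums)

-- ===== LEMMAS AND PROOFS =====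

-- common characterisation: scan with a "previous element was 2" flag
def chk : Bool → List Int → Bool
  | _, [] => true
  | prev2, x :: xs =>
    if x = 2 then
      if prev2 = true ∨ xs.head? = some 2 then chk true xs else false
    else chk false xs

theorem drop_cons (nums : List Int) (i : Nat) (h : i < nums.length) :
    nums.drop i = nums.getD i 0 :: nums.drop (i + 1) := by
  rw [List.drop_eq_getElem_cons h, List.getD_eq_getElem _ _ h]

theorem head?_drop (nums : List Int) (i : Nat) :
    (nums.drop i).head? = if h : i < nums.length then some (nums.getD i 0) else none := by
  split
  · next h => rw [drop_cons nums i h]; rfl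
  · next h => rw [List.drop_eq_nil_of_le (by omega), List.head?_nil]

-- A's loop equals chk with the "nums[i-1] == 2" flag
theorem A_eq_chk (nums : List Int) (i : Nat) :
    twoTwoLoop nums i = chk (decide (1 ≤ i ∧ nums.getD (i - 1) 0 = 2)) (nums.drop i) := by
  fun_induction twoTwoLoop with
  | case1 i h h2 h3 ih =>
    rw [drop_cons nums i h, chk]
    have hh : (nums.drop (i+1)).head? = some 2 ↔ (i + 1 < nums.length ∧ nums.getD (i+1) 0 = 2) := by
      rw [head?_drop]; split <;> simp_all
    have hc : (decide (1 ≤ i ∧ nums.getD (i - 1) 0 = 2) = true ∨ (nums.drop (i+1)).head? = some 2) := by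
      rcases h3 with h3 | h3
      · left; simpa using h3
      · right; exact hh.mpr h3
    simp only [h2, if_true, hc, if_true, ih]
    congr 1
    simp
    exact h2
  | case2 i h h2 h3 =>
    rw [drop_cons nums i h, chk]
    have hh : ¬((nums.drop (i+1)).head? = some 2) := by
      rw [head?_drop]; push_neg at h3; split <;> simp_all
    simp only [h2, if_true]
    rw [if_neg]
    push_neg at h3
    rintro (hc | hc)
    · exact absurd (of_decide_eq_true hc) (by push_neg; exact h3.1)
    · exact hh hc
  | case3 i h h2 ih =>
    rw [drop_cons nums i h, chk, if_neg h2, ih]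
    congr 1
    simp
    exact h2
  | case4 i h =>
    rw [List.drop_eq_nil_of_le (by omega)]
    rfl

-- runEnd facts
theorem runEnd_le (nums : List Int) (c : Int) (j : Nat) (h : j ≤ nums.length) :
    runEnd nums c j ≤ nums.length := by
  fun_induction runEnd with
  | case1 j hj ih => exact ih (by omega)
  | case2 j hj => omega

theorem runEnd_stop (nums : List Int) (c : Int) (j : Nat) :
    ¬(runEnd nums c j < nums.length ∧ nums.getD (runEnd nums c j) 0 = c) := by
  fun_induction runEnd with
  | case1 j hj ih => exact ih
  | case2 j hj => exact hj

theorem runEnd_mem (nums : List Int) (c : Int) (j : Nat) :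
    ∀ m, j ≤ m → m < runEnd nums c j → nums.getD m 0 = c := by
  fun_induction runEnd with
  | case1 j hj ih =>
    intro m h1 h2
    rcases Nat.eq_or_lt_of_le h1 with rfl | h1
    · exact hj.2
    · exact ih m h1 h2
  | case2 j hj =>
    intro m h1 h2
    omega

-- chk walks: flag irrelevant when the head is not 2
theorem chk_flag (b : Bool) (r : List Int) (h : r.head? ≠ some 2) : chk b r = chk false r := by
  cases r with
  | nil => rfl
  | cons x xs =>
    simp only [List.head?_cons, ne_eq, Option.some.injEq] at h
    simp [chk, h]

-- walk through a run of 2s with the flag set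
theorem chk_walk2 (nums : List Int) (j : Nat) (hle : j ≤ nums.length)
    (hstop : ¬(j < nums.length ∧ nums.getD j 0 = 2)) :
    ∀ n i, j - i = n → i < j → (∀ m, i ≤ m → m < j → nums.getD m 0 = 2) →
    chk true (nums.drop i) = chk false (nums.drop j) := by
  intro n
  induction n with
  | zero => omega
  | succ n ih =>
    intro i hd h1 hall
    rw [drop_cons nums i (by omega), chk]
    have hx : nums.getD i 0 = 2 := hall i le_rfl h1
    simp only [hx, if_true, true_or, if_true]
    by_cases he : i + 1 = j
    · rw [he]
      apply chk_flag
      rw [head?_drop]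
      split <;> simp_all
    · exact ih (i+1) (by omega) (by omega) (fun m hm hm' => hall m (by omega) hm')

-- walk through a run of non-2s: the flag ends up false
theorem chk_walkne (nums : List Int) (j : Nat) (hle : j ≤ nums.length) :
    ∀ n i, j - i = n → i < j → (∀ m, i ≤ m → m < j → nums.getD m 0 ≠ 2) →
    chk false (nums.drop i) = chk false (nums.drop j) := by
  intro n
  induction n with
  | zero => omega
  | succ n ih =>
    intro i hd h1 hall
    rw [drop_cons nums i (by omega), chk]
    have hx : nums.getD i 0 ≠ 2 := hall i le_rfl h1
    rw [if_neg hx]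
    by_cases he : i + 1 = j
    · rw [he]
    · exact ih (i+1) (by omega) (by omega) (fun m hm hm' => hall m (by omega) hm')

-- B's loop equals chk false on the remaining suffix
theorem B_eq_chk (nums : List Int) (i : Nat) :
    altLoop nums i = chk false (nums.drop i) := by
  fun_induction altLoop with
  | case1 i h j hcond =>
    -- isolated run of 2: j - i = 1
    obtain ⟨hx, hlen⟩ := hcond
    have hji : j = i + 1 := by have := runEnd_gt nums i h; omega
    rw [drop_cons nums i h, chk]
    simp only [hx, if_true]
    rw [if_neg]
    rintro (hc | hc)
    · simp at hc
    · rw [head?_drop] at hc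
      have hstop := runEnd_stop nums (nums.getD i 0) i
      rw [show runEnd nums (nums.getD i 0) i = j from rfl, hji] at hstop
      split at hc <;> simp_all
  | case2 i h j hcond ih =>
    have hgt : i < j := runEnd_gt nums i h
    have hle : j ≤ nums.length := runEnd_le nums (nums.getD i 0) i (by omega)
    have hmem : ∀ m, i ≤ m → m < j → nums.getD m 0 = nums.getD i 0 :=
      runEnd_mem nums (nums.getD i 0) i
    have hstop : ¬(j < nums.length ∧ nums.getD j 0 = nums.getD i 0) :=
      runEnd_stop nums (nums.getD i 0) i
    rw [ih]
    symm
    by_cases hx : nums.getD i 0 = 2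
    · -- run of 2s, length ≥ 2
      have hj2 : i + 2 ≤ j := by
        rcases Nat.lt_or_ge (i+1) j with h1 | h1
        · omega
        · exact absurd ⟨hx, by omega⟩ hcond
      rw [drop_cons nums i h, chk]
      simp only [hx, if_true]
      have hhd : (nums.drop (i+1)).head? = some 2 := by
        rw [head?_drop]
        have : nums.getD (i+1) 0 = nums.getD i 0 := hmem (i+1) (by omega) (by omega)
        split <;> simp_all
      rw [if_pos (Or.inr hhd)]
      exact chk_walk2 nums j hle
        (fun hc => hstop ⟨hc.1, by rw [hx]; exact hc.2⟩)
        (j - (i+1)) (i+1) rfl (by omega)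
        (fun m hm hm' => by rw [hmem m (by omega) hm', hx])
    · -- run of non-2s
      exact chk_walkne nums j hle (j - i) i rfl hgt
        (fun m hm hm' => by rw [hmem m hm hm']; exact hx)
  | case3 i h =>
    rw [List.drop_eq_nil_of_le (by omega)]
    rfl

-- ===== VERDICT (by name: the statement is the Claim_ definition above) =====
theorem twoTwo_spec : Claim_equal_twoTwo := by
  intro nums _
  show twoTwo nums = twoTwo_alt nums
  rw [twoTwo, twoTwo_alt, A_eq_chk, B_eq_chk]
  simp
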